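-- pv_equiv track=rewrite | github.com/schwehr/jsdoctor | jsdoctor/namespace.py | GetClosestNamespaceForSymbol
-- ===== SOURCE A (Python) =====
-- from typing import Iterable, Sequence
--
-- def GetNamespaceParts(namespace: str) -> list[str]:
--   # TODO(nanaze): Memoize. This is idempotent and hit a lot.
--   return namespace.split('.')
--
-- def IsSymbolPartOfNamespace(symbol: str, namespace: str) -> bool:
--   namespace_parts = GetNamespaceParts(namespace)
--   symbol_parts = GetNamespaceParts(symbol)
--
--   return namespace_parts == symbol_parts[0:len(namespace_parts)]
--
-- def _GetSymbolPartsInNamespace(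
--     symbol_parts: Sequence[str],
--     namespace_parts: Sequence[str]
--   ) -> int:
--   # A symbol can't be shorter than its namespace.
--   if len(symbol_parts) < len(namespace_parts):
--     return 0
--
--   count = 0
--   while count < len(namespace_parts):
--     if symbol_parts[count] != namespace_parts[count]:
--       return count
--
--     count += 1
--
--   return count
--
-- def GetClosestNamespaceForSymbol(
--     symbol: str,
--     candidate_namespaces: Iterable[str]
-- ) -> str | None:
--   closest_namespace = None
--   symbol_parts = GetNamespaceParts(symbol)
--
--   max_count = 0
--
--   valid_namespaces = list(filter(
--     lambda ns: IsSymbolPartOfNamespace(symbol, ns), candidate_namespaces))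
--
--   for ns in valid_namespaces:
--     namespace_parts = GetNamespaceParts(ns)
--     count = _GetSymbolPartsInNamespace(symbol_parts, namespace_parts)
--
--     if count > max_count:
--       closest_namespace = ns
--       max_count = count
--
--   return closest_namespace
-- ===== SOURCE B (Python) =====
-- def GetClosestNamespaceForSymbol(symbol, candidate_namespaces):
--   candidates = set(candidate_namespaces)
--   parts = symbol.split('.')
--   for i in range(len(parts), 0, -1):
--     prefix = '.'.join(parts[:i])
--     if prefix in candidates:
--       return prefix
--   return None
-- ===== Notes on version B (the rewrite author's own statement) =====
-- stated objective: faster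
-- what changed: Instead of scanning every candidate, splitting each and counting matching parts while tracking the longest, B builds a membership set of the candidates once and probes the symbol's own dotted prefixes longest-first, returning the first one present in the set.
import Mathlib
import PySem

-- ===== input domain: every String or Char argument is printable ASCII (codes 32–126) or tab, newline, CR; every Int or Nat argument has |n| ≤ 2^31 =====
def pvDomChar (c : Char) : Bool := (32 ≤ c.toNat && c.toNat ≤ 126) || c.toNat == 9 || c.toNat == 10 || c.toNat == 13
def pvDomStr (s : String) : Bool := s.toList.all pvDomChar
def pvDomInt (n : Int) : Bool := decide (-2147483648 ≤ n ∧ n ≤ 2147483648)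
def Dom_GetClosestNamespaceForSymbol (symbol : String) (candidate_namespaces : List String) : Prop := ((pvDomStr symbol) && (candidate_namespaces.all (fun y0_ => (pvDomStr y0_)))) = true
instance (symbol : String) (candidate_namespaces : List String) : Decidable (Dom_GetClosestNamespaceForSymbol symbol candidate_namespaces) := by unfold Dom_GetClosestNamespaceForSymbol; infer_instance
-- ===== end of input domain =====

-- B replaces A's scan over all candidates (split + part-count each, track max) by probing the
-- symbol's own dotted prefixes longest-first against a membership set of the candidates (objective: faster).


-- ===== PORT A =====
-- namespace.split('.'): sep "." is nonempty, so Str.split? always returns some; getD [] is exact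
def GetNamespaceParts (ns : String) : List String :=
  (PySem.Str.split? ns ".").getD []

def IsSymbolPartOfNamespace (symbol : String) (ns : String) : Bool :=
  let namespace_parts := GetNamespaceParts ns
  let symbol_parts := GetNamespaceParts symbol
  namespace_parts == PySem.List.slice symbol_parts (some 0) (some (namespace_parts.length : Int))

-- the 'while count < len(namespace_parts)' loop; indexing is in range here, pyGet? is exact
def GetSymbolPartsInNamespaceLoop (symbol_parts namespace_parts : List String) (count : Nat) : Nat :=
  if _h : count < namespace_parts.length then
    if PySem.List.pyGet? symbol_parts (count : Int) ≠ PySem.List.pyGet? namespace_parts (count : Int) then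
      count
    else
      GetSymbolPartsInNamespaceLoop symbol_parts namespace_parts (count + 1)
  else count
termination_by namespace_parts.length - count

def GetSymbolPartsInNamespace (symbol_parts namespace_parts : List String) : Nat :=
  if symbol_parts.length < namespace_parts.length then 0
  else GetSymbolPartsInNamespaceLoop symbol_parts namespace_parts 0

def GetClosestNamespaceForSymbol (symbol : String) (candidate_namespaces : List String) : Option String :=
  let symbol_parts := GetNamespaceParts symbol
  let valid_namespaces := candidate_namespaces.filter (fun ns => IsSymbolPartOfNamespace symbol ns)
  (valid_namespaces.foldl
    (fun st ns =>
      let namespace_parts := GetNamespaceParts ns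
      let count := GetSymbolPartsInNamespace symbol_parts namespace_parts
      if st.2 < count then (some ns, count) else st)
    ((none : Option String), (0 : Nat))).1

-- ===== PORT B =====
-- '.'.join(parts[:i])
def AltPrefixJoin (parts : List String) (i : Int) : String :=
  PySem.Str.join "." (PySem.List.slice parts none (some i))

-- the 'for i in range(len(parts), 0, -1)' loop with early return
def AltLoop (parts : List String) (candidates : PySem.Set String) : List Int → Option String
  | [] => none
  | i :: rest =>
    let pre := AltPrefixJoin parts i
    if candidates.contains pre then some pre else AltLoop parts candidates rest

def GetClosestNamespaceForSymbol_alt (symbol : String) (candidate_namespaces : List String) : Option String :=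
  let candidates := PySem.Set.ofList candidate_namespaces
  let parts := (PySem.Str.split? symbol ".").getD []
  AltLoop parts candidates (PySem.List.pyRange (parts.length : Int) 0 (-1))

-- ===== PRECONDITION & SPEC =====
def Spec_GetClosestNamespaceForSymbol (symbol : String) (candidate_namespaces : List String) (out : Option String) : Prop := out = GetClosestNamespaceForSymbol_alt symbol candidate_namespaces
instance (symbol : String) (candidate_namespaces : List String) (out : Option String) : Decidable (Spec_GetClosestNamespaceForSymbol symbol candidate_namespaces out) := by unfold Spec_GetClosestNamespaceForSymbol; infer_instance

-- ===== CLAIM (what is proved, stated in full; the proofs are below) =====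
def Claim_equal_GetClosestNamespaceForSymbol : Prop := ∀ (symbol : String) (candidate_namespaces : List String), Dom_GetClosestNamespaceForSymbol symbol candidate_namespaces → Spec_GetClosestNamespaceForSymbol symbol candidate_namespaces (GetClosestNamespaceForSymbol symbol candidate_namespaces)

-- ===== LEMMAS AND PROOFS =====

-- Chars.splitOn with a single-character separator is Mathlib's List.splitOn
theorem pvGo_eq (c : Char) : ∀ (fuel : Nat) (l cur : List Char) (acc : List (List Char)), l.length ≤ fuel →
    PySem.Chars.splitOn.go [c] fuel l cur acc
      = acc.reverse ++ (List.splitOn c l).modifyHead (fun t => cur.reverse ++ t) := by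
  intro fuel
  induction fuel with
  | zero =>
    intro l cur acc h
    have : l = [] := by cases l <;> simp_all
    subst this
    simp [PySem.Chars.splitOn.go, List.splitOn, List.splitOnP, List.splitOnP.go]
  | succ fuel ih =>
    intro l cur acc h
    cases l with
    | nil => simp [PySem.Chars.splitOn.go, List.splitOn, List.splitOnP, List.splitOnP.go]
    | cons ch rest =>
      rw [PySem.Chars.splitOn.go]
      by_cases hc : ch = c
      · subst hc
        have hpre : [ch].isPrefixOf (ch :: rest) = true := by simp [List.isPrefixOf]
        rw [if_pos hpre]
        simp only [List.length_cons, List.length_nil, List.drop_succ_cons, List.drop_zero]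
        rw [ih rest [] (cur.reverse :: acc) (by simpa using Nat.le_of_succ_le_succ h)]
        simp only [List.splitOn, List.splitOnP_cons, beq_self_eq_true, if_true, List.modifyHead,
          List.reverse_cons, List.append_assoc, List.reverse_nil, List.nil_append,
          List.singleton_append]
        cases h' : List.splitOnP (fun x => x == ch) rest <;> simp
      · have hpre : [c].isPrefixOf (ch :: rest) = false := by
          simp [List.isPrefixOf]; exact fun h' => (hc h'.symm).elim
        rw [if_neg (by simp [hpre])]
        rw [ih rest (ch :: cur) acc (by simpa using Nat.le_of_succ_le_succ h)]
        have : List.splitOn c (ch :: rest) = (List.splitOn c rest).modifyHead (fun t => ch :: t) := by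
          simp [List.splitOn, List.splitOnP_cons, hc]
        rw [this, List.modifyHead_modifyHead]
        have hf : (fun t => (ch :: cur).reverse ++ t) = ((fun t => cur.reverse ++ t) ∘ fun t => ch :: t) := by
          funext t; simp
        rw [hf]

theorem pvSplitOn_eq (c : Char) (s : List Char) :
    PySem.Chars.splitOn s [c] = List.splitOn c s := by
  unfold PySem.Chars.splitOn
  rw [pvGo_eq c (s.length + 1) s [] [] (by omega)]
  cases List.splitOn c s <;> simp

theorem pvGetParts_eq (s : String) :
    (GetNamespaceParts s) = (List.splitOn '.' s.toList).map String.ofList := by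
  simp [GetNamespaceParts, PySem.Str.split?, PySem.Chars.split?, pvSplitOn_eq]

theorem pvMapToList_getParts (s : String) :
    ((GetNamespaceParts s) |>.map String.toList) = List.splitOn '.' s.toList := by
  rw [pvGetParts_eq]
  simp [List.map_map, Function.comp_def, String.toList_ofList]

theorem pvGetParts_ne_nil (s : String) : (GetNamespaceParts s) ≠ [] := by
  rw [pvGetParts_eq]
  simp [List.splitOn, List.splitOnP_ne_nil]

theorem pvJoin_getParts (s : String) :
    PySem.Str.join "." (GetNamespaceParts s) = s := by
  simp only [PySem.Str.join, PySem.Chars.join, pvMapToList_getParts]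
  have h1 : (".".toList) = ['.'] := rfl
  rw [h1, List.intercalate_splitOn, String.ofList_toList]

theorem pvNot_mem_splitOn (c : Char) (l : List Char) : ∀ p ∈ List.splitOn c l, c ∉ p := by
  induction l with
  | nil => simp [List.splitOn, List.splitOnP, List.splitOnP.go]
  | cons x xs ih =>
    intro p hp
    by_cases hx : x = c
    · have hsp : List.splitOn c (x :: xs) = [] :: List.splitOn c xs := by
        simp [List.splitOn, List.splitOnP_cons, hx]
      rw [hsp] at hp
      rcases List.mem_cons.mp hp with rfl | hp
      · simp
      · exact ih p hp
    · cases h' : List.splitOnP (fun y => y == c) xs with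
      | nil => exact absurd h' (List.splitOnP_ne_nil _ _)
      | cons hd tl =>
        have hsp : List.splitOn c (x :: xs) = (x :: hd) :: tl := by
          simp [List.splitOn, List.splitOnP_cons, hx, h', List.modifyHead]
        rw [hsp] at hp
        rcases List.mem_cons.mp hp with rfl | hp
        · intro hmem
          rcases List.mem_cons.mp hmem with heq | hmem
          · exact hx heq.symm
          · exact ih hd (by simp [List.splitOn, h']) hmem
        · exact ih p (by simp [List.splitOn, h', hp])

-- '.'.join(sp.take i), the candidate prefix with i parts
def pvPrefix (sp : List String) (i : Nat) : String := PySem.Str.join "." (sp.take i)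

theorem pvSplit_prefix (s : String) (i : Nat) (h1 : 1 ≤ i) :
    GetNamespaceParts (pvPrefix (GetNamespaceParts s) i) = (GetNamespaceParts s).take i := by
  have hL := pvGetParts_eq s
  set L := List.splitOn '.' s.toList with hLdef
  have hne : L ≠ [] := List.splitOnP_ne_nil _ _
  have htne : L.take i ≠ [] := by
    rw [Ne, List.take_eq_nil_iff]
    push_neg
    exact ⟨by omega, hne⟩
  have hnomem : ∀ l ∈ L.take i, '.' ∉ l := fun l hl =>
    pvNot_mem_splitOn '.' s.toList l (List.mem_of_mem_take hl)
  have hpre : pvPrefix (GetNamespaceParts s) i = String.ofList (['.'].intercalate (L.take i)) := by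
    rw [pvPrefix, hL, ← List.map_take, PySem.Str.join]
    congr 1
    simp [PySem.Chars.join, List.map_map, Function.comp_def, String.toList_ofList]
  rw [hpre, pvGetParts_eq]
  rw [String.toList_ofList, List.splitOn_intercalate _ _ hnomem htne, hL, List.map_take]

-- the number of leading parts of ns, as the split-length
def pvCnt (ns : String) : Nat := (GetNamespaceParts ns).length

theorem pvLoop_eq (sp np : List String) (h : ∀ j, j < np.length → sp[j]? = np[j]?)
    (count : Nat) (hc : count ≤ np.length) :
    GetSymbolPartsInNamespaceLoop sp np count = np.length := by
  rw [GetSymbolPartsInNamespaceLoop]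
  by_cases hlt : count < np.length
  · rw [dif_pos hlt]
    have hg : PySem.List.pyGet? sp (count : Int) = PySem.List.pyGet? np (count : Int) := by
      rw [PySem.List.pyGet?_natCast, PySem.List.pyGet?_natCast]
      exact h count hlt
    rw [if_neg (by simp [hg])]
    exact pvLoop_eq sp np h (count + 1) hlt
  · rw [dif_neg hlt]
    omega
termination_by np.length - count

-- a valid candidate is exactly pvPrefix of its own part count
theorem pvValid_elim (symbol ns : String) (hv : IsSymbolPartOfNamespace symbol ns = true) :
    GetSymbolPartsInNamespace (GetNamespaceParts symbol) (GetNamespaceParts ns) = pvCnt ns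
    ∧ 1 ≤ pvCnt ns ∧ pvCnt ns ≤ (GetNamespaceParts symbol).length
    ∧ ns = pvPrefix (GetNamespaceParts symbol) (pvCnt ns) := by
  have hv' : GetNamespaceParts ns
      = PySem.List.slice (GetNamespaceParts symbol) (some 0) (some ((GetNamespaceParts ns).length : Int)) := by
    simpa [IsSymbolPartOfNamespace] using hv
  have hslice : PySem.List.slice (GetNamespaceParts symbol) (some 0) (some ((GetNamespaceParts ns).length : Int))
      = (GetNamespaceParts symbol).take (GetNamespaceParts ns).length := by
    have := PySem.List.slice_natCast (GetNamespaceParts symbol) 0 (GetNamespaceParts ns).length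
    simpa using this
  have htake : GetNamespaceParts ns = (GetNamespaceParts symbol).take (GetNamespaceParts ns).length :=
    hv'.trans hslice
  have h1 : 1 ≤ pvCnt ns := by
    have := pvGetParts_ne_nil ns
    have := List.length_pos_iff.mpr this
    simpa [pvCnt] using this
  have h2 : pvCnt ns ≤ (GetNamespaceParts symbol).length := by
    have := congrArg List.length htake
    simp [pvCnt] at this ⊢
    omega
  refine ⟨?_, h1, h2, ?_⟩
  · rw [GetSymbolPartsInNamespace, if_neg (by simp [pvCnt] at h2; omega)]
    apply pvLoop_eq
    · intro j hj
      conv_rhs => rw [htake]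
      rw [List.getElem?_take, if_pos hj]
    · exact Nat.zero_le _
  · have hjoin : pvPrefix (GetNamespaceParts symbol) (pvCnt ns)
        = PySem.Str.join "." (GetNamespaceParts ns) := by
      rw [pvPrefix]
      simp only [pvCnt]
      rw [← htake]
    rw [hjoin, pvJoin_getParts]

theorem pvValid_prefix (symbol : String) (i : Nat) (h1 : 1 ≤ i)
    (h2 : i ≤ (GetNamespaceParts symbol).length) :
    IsSymbolPartOfNamespace symbol (pvPrefix (GetNamespaceParts symbol) i) = true
    ∧ pvCnt (pvPrefix (GetNamespaceParts symbol) i) = i := by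
  have hsplit := pvSplit_prefix symbol i h1
  have hlen : (GetNamespaceParts (pvPrefix (GetNamespaceParts symbol) i)).length = i := by
    rw [hsplit, List.length_take]
    omega
  constructor
  · simp only [IsSymbolPartOfNamespace]
    rw [hlen, hsplit]
    have hs : PySem.List.slice (GetNamespaceParts symbol) (some 0) (some (i : Int))
        = List.take i (GetNamespaceParts symbol) := by
      simpa using PySem.List.slice_natCast (GetNamespaceParts symbol) 0 i
    rw [hs]
    exact beq_self_eq_true _
  · simpa [pvCnt] using hlen

-- A's fold state as a function of the running maximum
def pvSt (sp : List String) (m : Nat) : Option String × Nat :=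
  (if m = 0 then none else some (pvPrefix sp m), m)

theorem pvFoldA (symbol : String) (l : List String)
    (hl : ∀ ns ∈ l, IsSymbolPartOfNamespace symbol ns = true) (m : Nat) :
    l.foldl
      (fun st ns =>
        let namespace_parts := GetNamespaceParts ns
        let count := GetSymbolPartsInNamespace (GetNamespaceParts symbol) namespace_parts
        if st.2 < count then (some ns, count) else st)
      (pvSt (GetNamespaceParts symbol) m)
    = pvSt (GetNamespaceParts symbol) (l.foldl (fun a ns => max a (pvCnt ns)) m) := by
  induction l generalizing m with
  | nil => rfl
  | cons ns t ih =>
    have hv := hl ns (List.mem_cons_self)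
    obtain ⟨hcount, hc1, hc2, hns⟩ := pvValid_elim symbol ns hv
    simp only [List.foldl_cons]
    have hstep :
        (if (pvSt (GetNamespaceParts symbol) m).2 < GetSymbolPartsInNamespace (GetNamespaceParts symbol) (GetNamespaceParts ns)
          then (some ns, GetSymbolPartsInNamespace (GetNamespaceParts symbol) (GetNamespaceParts ns))
          else pvSt (GetNamespaceParts symbol) m)
        = pvSt (GetNamespaceParts symbol) (max m (pvCnt ns)) := by
      simp only [pvSt, hcount]
      by_cases hm : m < pvCnt ns
      · rw [if_pos hm]
        have hmax : max m (pvCnt ns) = pvCnt ns := Nat.max_eq_right (Nat.le_of_lt hm)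
        rw [hmax, if_neg (by omega)]
        rw [← hns]
      · rw [if_neg hm]
        have hmax : max m (pvCnt ns) = m := Nat.max_eq_left (Nat.le_of_not_lt hm)
        rw [hmax]
    rw [hstep]
    exact ih (fun x hx => hl x (List.mem_cons_of_mem _ hx)) (max m (pvCnt ns))

theorem pvFoldMax_init {α : Type} (f : α → Nat) (l : List α) (a : Nat) :
    a ≤ l.foldl (fun b x => max b (f x)) a := by
  induction l generalizing a with
  | nil => exact Nat.le_refl a
  | cons x t ih => exact Nat.le_trans (Nat.le_max_left a (f x)) (ih (max a (f x)))

theorem pvFoldMax_mem {α : Type} (f : α → Nat) (l : List α) (a : Nat) {x : α} (hx : x ∈ l) :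
    f x ≤ l.foldl (fun b x => max b (f x)) a := by
  induction l generalizing a with
  | nil => cases hx
  | cons y t ih =>
    rcases List.mem_cons.mp hx with rfl | hx
    · exact Nat.le_trans (Nat.le_max_right a (f x)) (pvFoldMax_init f t (max a (f x)))
    · exact ih (max a (f y)) hx

theorem pvFoldMax_cases {α : Type} (f : α → Nat) (l : List α) (a : Nat) :
    l.foldl (fun b x => max b (f x)) a = a ∨ ∃ x ∈ l, l.foldl (fun b x => max b (f x)) a = f x := by
  induction l generalizing a with
  | nil => exact Or.inl rfl
  | cons x t ih =>
    simp only [List.foldl_cons]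
    rcases ih (max a (f x)) with h | ⟨y, hy, hEq⟩
    · rcases max_choice a (f x) with h' | h'
      · exact Or.inl (by rw [h, h'])
      · exact Or.inr ⟨x, List.mem_cons_self, by rw [h, h']⟩
    · exact Or.inr ⟨y, List.mem_cons_of_mem _ hy, hEq⟩

-- the descending index list n, n-1, …, 1 as Ints
def pvDescInt : Nat → List Int
  | 0 => []
  | n + 1 => (((n + 1 : Nat)) : Int) :: pvDescInt n

theorem pvRange_desc (n : Nat) :
    PySem.List.pyRange (n : Int) 0 (-1) = pvDescInt n := by
  have key : ∀ (m : Nat), List.map (fun (k : Nat) => (m : Int) + (-1) * (k : Int)) (List.range m) = pvDescInt m := by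
    intro m
    induction m with
    | zero => simp [pvDescInt]
    | succ m ihm =>
      rw [List.range_succ_eq_map, pvDescInt]
      simp only [List.map_cons, List.map_map]
      refine List.cons_eq_cons.mpr ⟨by push_cast; ring, ?_⟩
      rw [← ihm]
      apply List.map_congr_left
      intro k _
      simp only [Function.comp_apply]
      push_cast
      ring
  cases n with
  | zero => simp [PySem.List.pyRange, pvDescInt]
  | succ m =>
    rw [← key]
    simp only [PySem.List.pyRange]
    rw [if_neg (by norm_num)]
    have h1 : ¬ ((0:Int) < -1) := by norm_num
    rw [if_neg h1]
    have h2 : (0:Int) < ((m + 1 : Nat) : Int) := by positivity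
    rw [if_pos h2]
    have h3 : (((m + 1 : Nat) : Int) - 0 + - (-1) - 1) / - (-1) = ((m + 1 : Nat) : Int) := by
      norm_num
    rw [h3]
    norm_num


-- what B's loop computes, phrased over Nat indices
def pvFind (symbol : String) (cands : List String) : Nat → Option String
  | 0 => none
  | i + 1 =>
    if pvPrefix (GetNamespaceParts symbol) (i + 1) ∈ cands
    then some (pvPrefix (GetNamespaceParts symbol) (i + 1))
    else pvFind symbol cands i

theorem pvAltLoop_eq (symbol : String) (cands : List String) (b : Nat) :
    AltLoop (GetNamespaceParts symbol) (PySem.Set.ofList cands) (pvDescInt b)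
      = pvFind symbol cands b := by
  induction b with
  | zero => rfl
  | succ b ihb =>
    rw [pvDescInt, AltLoop]
    have hpre : AltPrefixJoin (GetNamespaceParts symbol) ((((b + 1 : Nat)) : Int))
        = pvPrefix (GetNamespaceParts symbol) (b + 1) := by
      rw [AltPrefixJoin, pvPrefix, PySem.List.slice_to _ (by positivity)]
      norm_num
    by_cases hmem : pvPrefix (GetNamespaceParts symbol) (b + 1) ∈ cands
    · have hcon : (PySem.Set.ofList cands).contains (AltPrefixJoin (GetNamespaceParts symbol) (((b + 1 : Nat)) : Int)) = true := by
        rw [hpre, PySem.Set.contains_iff, PySem.Set.mem_ofList]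
        exact hmem
      rw [pvFind, if_pos hmem]
      simp only [hpre]
      rw [hpre] at hcon
      rw [if_pos hcon]
    · have hcon : (PySem.Set.ofList cands).contains (AltPrefixJoin (GetNamespaceParts symbol) (((b + 1 : Nat)) : Int)) = false := by
        rw [hpre]
        rw [Bool.eq_false_iff, Ne, PySem.Set.contains_iff, PySem.Set.mem_ofList]
        exact hmem
      rw [pvFind, if_neg hmem]
      simp only [hpre]
      rw [hpre] at hcon
      rw [hcon]
      simpa using ihb

theorem pvFind_none (symbol : String) (cands : List String) (b : Nat)
    (h : ∀ i, 1 ≤ i → i ≤ b → pvPrefix (GetNamespaceParts symbol) i ∉ cands) :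
    pvFind symbol cands b = none := by
  induction b with
  | zero => rfl
  | succ b ihb =>
    rw [pvFind, if_neg (h (b + 1) (by omega) (by omega))]
    exact ihb (fun i h1 h2 => h i h1 (by omega))

theorem pvFind_some (symbol : String) (cands : List String) (M b : Nat)
    (hM1 : 1 ≤ M) (hMb : M ≤ b)
    (hmem : pvPrefix (GetNamespaceParts symbol) M ∈ cands)
    (habove : ∀ i, M < i → i ≤ b → pvPrefix (GetNamespaceParts symbol) i ∉ cands) :
    pvFind symbol cands b = some (pvPrefix (GetNamespaceParts symbol) M) := by
  induction b with
  | zero => omega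
  | succ b ihb =>
    by_cases hb : M = b + 1
    · subst hb
      rw [pvFind, if_pos hmem]
    · rw [pvFind, if_neg (habove (b + 1) (by omega) (by omega))]
      exact ihb (by omega) (fun i h1 h2 => habove i h1 (by omega))

-- ===== VERDICT (by name: the statement is the Claim_ definition above) =====
theorem GetClosestNamespaceForSymbol_spec : Claim_equal_GetClosestNamespaceForSymbol := by
  intro symbol cands _
  unfold Spec_GetClosestNamespaceForSymbol
  have hB : GetClosestNamespaceForSymbol_alt symbol cands
      = pvFind symbol cands (GetNamespaceParts symbol).length := by
    show AltLoop (GetNamespaceParts symbol) (PySem.Set.ofList cands)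
        (PySem.List.pyRange ((GetNamespaceParts symbol).length : Int) 0 (-1))
      = pvFind symbol cands (GetNamespaceParts symbol).length
    rw [pvRange_desc, pvAltLoop_eq]
  set vs := cands.filter (fun ns => IsSymbolPartOfNamespace symbol ns) with hvs
  have hval : ∀ ns ∈ vs, IsSymbolPartOfNamespace symbol ns = true :=
    fun ns h => (List.mem_filter.mp h).2
  set M := vs.foldl (fun a ns => max a (pvCnt ns)) 0 with hM
  have hA : GetClosestNamespaceForSymbol symbol cands = (pvSt (GetNamespaceParts symbol) M).1 := by
    show (vs.foldl
        (fun st ns =>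
          let namespace_parts := GetNamespaceParts ns
          let count := GetSymbolPartsInNamespace (GetNamespaceParts symbol) namespace_parts
          if st.2 < count then (some ns, count) else st)
        (pvSt (GetNamespaceParts symbol) 0)).1 = _
    rw [pvFoldA symbol vs hval 0]
  rw [hA, hB]
  by_cases hM0 : M = 0
  · rw [hM0]
    have : (pvSt (GetNamespaceParts symbol) 0).1 = none := rfl
    rw [this, pvFind_none]
    intro i hi1 hi2 hmem
    obtain ⟨hvalid, hcnt⟩ := pvValid_prefix symbol i hi1 hi2
    have hin : pvPrefix (GetNamespaceParts symbol) i ∈ vs :=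
      List.mem_filter.mpr ⟨hmem, hvalid⟩
    have := pvFoldMax_mem pvCnt vs 0 hin
    rw [← hM, hcnt] at this
    omega
  · rcases pvFoldMax_cases pvCnt vs 0 with hc | ⟨ns, hns, hEq⟩
    · exact absurd (hM.trans hc) hM0
    · have hEq' : M = pvCnt ns := hM.trans hEq
      have hvns := hval ns hns
      obtain ⟨hcount, h1, h2, hform⟩ := pvValid_elim symbol ns hvns
      have hmem : pvPrefix (GetNamespaceParts symbol) M ∈ cands := by
        rw [hEq', ← hform]
        exact (List.mem_filter.mp hns).1
      rw [pvFind_some symbol cands M (GetNamespaceParts symbol).length (by omega) (by omega) hmem]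
      · show (if M = 0 then none else some (pvPrefix (GetNamespaceParts symbol) M)) = _
        rw [if_neg hM0]
      · intro i hi1 hi2 hmemi
        obtain ⟨hvalid, hcnt⟩ := pvValid_prefix symbol i (by omega) hi2
        have hin : pvPrefix (GetNamespaceParts symbol) i ∈ vs :=
          List.mem_filter.mpr ⟨hmemi, hvalid⟩
        have := pvFoldMax_mem pvCnt vs 0 hin
        rw [← hM, hcnt] at this
        omega
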